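-- pv_equiv track=rewrite | github.com/nancyrs22/TF_Adminfo | KNN.py | _mostFound
-- ===== SOURCE A (Python) =====
-- def _mostFound(labels):
--     words = []
--     for i in range(len(labels)):
--         if labels[i] not in words:
--             words.append(labels[i])
--
--     mostCounted = ''
--     nMostCounted = None
--
--     for i in range(len(words)):
--
--         counted = labels.count(words[i])
--
--         if nMostCounted == None:
--
--             mostCounted = words[i]
--             nMostCounted = counted
--
--         elif nMostCounted < counted:
--
--             mostCounted = words[i]
--             nMostCounted = counted
--
--         elif nMostCounted == counted:
--
--             mostCounted = None
--
--     return mostCounted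
-- ===== SOURCE B (Python) =====
-- def _mostFound(labels):
--     counts = {}
--     for x in labels:
--         counts[x] = counts.get(x, 0) + 1
--     if not counts:
--         return ''
--     m = max(counts.values())
--     winners = [w for w, c in counts.items() if c == m]
--     return winners[0] if len(winners) == 1 else None
-- ===== Notes on version B (the rewrite author's own statement) =====
-- stated objective: faster
-- what changed: A's first-occurrence dedup list with repeated labels.count scans (O(n*k)) is replaced by a single counting pass into a dict followed by a max-and-filter over its items (O(n+k)).
import Mathlib
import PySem

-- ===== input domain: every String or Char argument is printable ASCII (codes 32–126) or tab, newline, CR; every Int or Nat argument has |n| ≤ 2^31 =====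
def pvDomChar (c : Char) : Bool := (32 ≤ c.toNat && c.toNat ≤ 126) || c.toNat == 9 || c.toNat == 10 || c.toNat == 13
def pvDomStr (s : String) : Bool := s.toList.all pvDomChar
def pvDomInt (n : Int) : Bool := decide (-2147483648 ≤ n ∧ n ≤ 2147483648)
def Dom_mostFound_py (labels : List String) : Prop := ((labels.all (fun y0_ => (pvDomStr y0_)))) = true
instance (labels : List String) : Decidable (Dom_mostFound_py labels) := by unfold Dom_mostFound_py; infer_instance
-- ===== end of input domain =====

-- B replaces A's first-occurrence dedup list + repeated labels.count scans by one counting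
-- pass into a dict followed by a max-and-filter over its items (objective: faster).

-- ===== PORT A =====
-- loop body of A's first loop: 'if labels[i] not in words: words.append(labels[i])'
def pvWordsStep (ws : List String) (x : String) : List String :=
  if x ∈ ws then ws else ws ++ [x]

-- loop body of A's second loop (state = (mostCounted, nMostCounted))
def pvBestStep (labels : List String) (st : Option String × Option Int) (w : String) :
    Option String × Option Int :=
  let counted : Int := (PySem.List.count labels w : Int)
  match st.2 with
  | none => (some w, some counted)
  | some n =>
    if n < counted then (some w, some counted)
    else if n = counted then (none, some n)
    else st

def mostFound_py (labels : List String) : Option String :=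
  let words : List String :=
    (PySem.List.pyRange 0 (PySem.List.len labels) 1).foldl
      (fun ws i => pvWordsStep ws (PySem.List.pyGetD labels i "")) []
  ((PySem.List.pyRange 0 (PySem.List.len words) 1).foldl
      (fun st i => pvBestStep labels st (PySem.List.pyGetD words i ""))
      ((some ""), none)).1

-- ===== PORT B =====
def mostFound_py_alt (labels : List String) : Option String :=
  let counts : PySem.Dict String Int :=
    labels.foldl (fun d x => d.insert x (d.getD x 0 + 1)) PySem.Dict.empty
  if counts.items.isEmpty then some ""
  else
    match PySem.List.max? (PySem.Dict.values counts) (fun v => v) with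
    | none => none  -- unreachable: counts is nonempty here
    | some m =>
      let winners : List String :=
        (counts.items.filter (fun p => p.2 == m)).map Prod.fst
      if winners.length == 1 then some (PySem.List.pyGetD winners 0 "") else none

-- ===== PRECONDITION & SPEC =====
def Spec_mostFound_py (labels : List String) (out : Option String) : Prop := out = mostFound_py_alt labels
instance (labels : List String) (out : Option String) : Decidable (Spec_mostFound_py labels out) := by unfold Spec_mostFound_py; infer_instance

-- ===== CLAIM (what is proved, stated in full; the proofs are below) =====
def Claim_equal_mostFound_py : Prop := ∀ (labels : List String), Dom_mostFound_py labels → Spec_mostFound_py labels (mostFound_py labels)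

-- ===== LEMMAS AND PROOFS =====

-- count of w in labels, as Python int
def pvC (labels : List String) (w : String) : Int := (PySem.List.count labels w : Int)

-- running max of counts over t, started at n
def pvM (labels : List String) (t : List String) (n : Int) : Int :=
  (t.map (pvC labels)).foldl max n

-- closed form of A's second loop continued from state (mc, some n)
def pvR (labels : List String) (t : List String) (mc : Option String) (n : Int) : Option String :=
  if t.countP (fun w => pvC labels w == pvM labels t n) = 0 then mc
  else if n = pvM labels t n then none
  else if t.countP (fun w => pvC labels w == pvM labels t n) = 1 then
    some ((t.filter (fun w => pvC labels w == pvM labels t n)).headD "")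
  else none

theorem pvM_ge (labels t n) : n ≤ pvM labels t n := by
  exact (PySem.List.le_foldl_max (t.map (pvC labels)) n).1

theorem pvM_of_countP_zero (labels t n)
    (h : t.countP (fun w => pvC labels w == pvM labels t n) = 0) : pvM labels t n = n := by
  rcases PySem.List.foldl_max_mem (t.map (pvC labels)) n with h' | h'
  · exact h'
  · exfalso
    rcases List.mem_map.mp h' with ⟨w, hw, hc⟩
    have := List.countP_eq_zero.mp h w hw
    simp [hc] at this
    exact this (by simp [pvM])

theorem pv_fold_closed (labels : List String) :
    ∀ (t : List String) (mc : Option String) (n : Int),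
      t.foldl (pvBestStep labels) (mc, some n) = (pvR labels t mc n, some (pvM labels t n)) := by
  intro t
  induction t with
  | nil => intro mc n; simp [pvR, pvM]
  | cons w t ih =>
    intro mc n
    have hM : pvM labels (w :: t) n = pvM labels t (max n (pvC labels w)) := by
      simp [pvM]
    have hstep : pvBestStep labels (mc, some n) w =
        if n < pvC labels w then (some w, some (pvC labels w))
        else if n = pvC labels w then (none, some n) else (mc, some n) := by
      rfl
    rw [List.foldl_cons, hstep]
    rcases lt_trichotomy n (pvC labels w) with hlt | heq | hgt
    · rw [if_pos hlt, ih]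
      have hM' : pvM labels (w :: t) n = pvM labels t (pvC labels w) := by
        rw [hM, max_eq_right hlt.le]
      refine Prod.ext ?_ (by simp [hM'])
      show pvR labels t (some w) (pvC labels w) = pvR labels (w :: t) mc n
      have hcwM : pvC labels w ≤ pvM labels t (pvC labels w) := pvM_ge labels t _
      simp only [pvR, hM', List.countP_cons, List.filter_cons]
      by_cases hk : t.countP (fun x => pvC labels x == pvM labels t (pvC labels w)) = 0
      · have hMeq : pvM labels t (pvC labels w) = pvC labels w :=
          pvM_of_countP_zero labels t _ hk
        have hfil : t.filter (fun x => pvC labels x == pvM labels t (pvC labels w)) = [] := by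
          have := List.countP_eq_length_filter (l := t)
            (p := fun x => pvC labels x == pvM labels t (pvC labels w))
          rw [hk] at this
          exact (List.length_eq_zero_iff).mp this.symm
        simp [hMeq, hlt.ne]
      · by_cases hcw : pvC labels w = pvM labels t (pvC labels w)
        · have hne : ¬ n = pvM labels t (pvC labels w) := by omega
          simp only [← hcw] at hk ⊢
          simp [hk, hlt.ne]
        · have hne : ¬ n = pvM labels t (pvC labels w) := by omega
          simp [hk, hcw, hne]
    · rw [if_neg (by omega), if_pos heq, ih]
      have hM' : pvM labels (w :: t) n = pvM labels t n := by
        rw [hM, max_eq_left heq.ge]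
      refine Prod.ext ?_ (by simp [hM'])
      show pvR labels t none n = pvR labels (w :: t) mc n
      have hnM : n ≤ pvM labels t n := pvM_ge labels t n
      simp only [pvR, hM', List.countP_cons, List.filter_cons]
      by_cases hnMeq : n = pvM labels t n
      · simp only [← hnMeq]
        simp [← heq]
      · have hcw : ¬ pvC labels w = pvM labels t n := by omega
        by_cases hk : t.countP (fun x => pvC labels x == pvM labels t n) = 0
        · exact absurd (pvM_of_countP_zero labels t n hk) (by omega)
        · simp [hk, hcw, hnMeq]
    · rw [if_neg (by omega), if_neg (by omega), ih]
      have hM' : pvM labels (w :: t) n = pvM labels t n := by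
        rw [hM, max_eq_left hgt.le]
      refine Prod.ext ?_ (by simp [hM'])
      show pvR labels t mc n = pvR labels (w :: t) mc n
      have hcw : ¬ pvC labels w = pvM labels t n := by
        have := pvM_ge labels t n; omega
      simp only [pvR, hM', List.countP_cons, List.filter_cons]
      simp [hcw]

theorem pvR_eq_sel (labels : List String) (w0 : String) (t : List String) :
    pvR labels t (some w0) (pvC labels w0) =
      (if ((w0 :: t).filter
            (fun w => pvC labels w == pvM labels t (pvC labels w0))).length == 1 then
        some (PySem.List.pyGetD
          ((w0 :: t).filter (fun w => pvC labels w == pvM labels t (pvC labels w0))) 0 "")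
      else none) := by
  have hlen : ∀ p : String → Bool, (t.filter p).length = t.countP p := by
    intro p; exact List.countP_eq_length_filter.symm
  have hcwM : pvC labels w0 ≤ pvM labels t (pvC labels w0) := pvM_ge labels t _
  by_cases hk : t.countP (fun x => pvC labels x == pvM labels t (pvC labels w0)) = 0
  · have hMeq : pvM labels t (pvC labels w0) = pvC labels w0 :=
      pvM_of_countP_zero labels t _ hk
    have hfil : t.filter (fun x => pvC labels x == pvM labels t (pvC labels w0)) = [] := by
      have := hlen (fun x => pvC labels x == pvM labels t (pvC labels w0))
      rw [hk] at this
      exact List.length_eq_zero_iff.mp this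
    simp [pvR, hMeq, PySem.List.pyGetD_zero_cons]
  · by_cases hcw : pvC labels w0 = pvM labels t (pvC labels w0)
    · unfold pvR
      rw [if_neg hk, if_pos hcw]
      have hcond : ¬ (((w0 :: t).filter
          (fun w => pvC labels w == pvM labels t (pvC labels w0))).length == 1) = true := by
        have hb : (pvC labels w0 == pvM labels t (pvC labels w0)) = true :=
          beq_iff_eq.mpr hcw
        simp [hb]
        rcases List.countP_pos_iff.mp (Nat.pos_of_ne_zero hk) with ⟨x, hx, hpx⟩
        exact ⟨x, hx, by simpa using hpx⟩
      rw [if_neg hcond]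
    · simp only [pvR, List.filter_cons, hcw]
      by_cases hk1 : t.countP (fun x => pvC labels x == pvM labels t (pvC labels w0)) = 1
      · have : (t.filter
            (fun x => pvC labels x == pvM labels t (pvC labels w0))).length = 1 := by
          rw [hlen]; exact hk1
        simp [hk1, hcw, this, PySem.List.pyGetD_zero]
        obtain ⟨x, hx⟩ := List.length_eq_one_iff.mp this
        simp [← List.head?_filter, hx]
      · have : ¬ (t.filter
            (fun x => pvC labels x == pvM labels t (pvC labels w0))).length = 1 := by
          rw [hlen]; exact hk1
        simp [hk, hk1, hcw, this]

theorem mostFound_py_spec' (labels : List String) :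
    mostFound_py labels = mostFound_py_alt labels := by
  cases labels with
  | nil => rfl
  | cons a l =>
    -- A side
    have hwords : (PySem.List.pyRange 0 (PySem.List.len (a :: l)) 1).foldl
        (fun ws i => pvWordsStep ws (PySem.List.pyGetD (a :: l) i "")) []
        = PySem.Set.ofList (a :: l) := by
      rw [PySem.List.foldl_pyRange_zero_pyGetD]
      rw [PySem.Set.ofList_eq_foldl]
      apply PySem.List.foldl_congr_mem
      intro acc x _
      simp [pvWordsStep, PySem.Set.add_eq_ite]
    have hA : mostFound_py (a :: l)
        = pvR (a :: l) (PySem.Set.discard (PySem.Set.ofList l) a) (some a) (pvC (a :: l) a) := by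
      simp only [mostFound_py, hwords]
      rw [PySem.List.foldl_pyRange_zero_pyGetD]
      rw [PySem.Set.ofList_cons, List.foldl_cons]
      have hfirst : pvBestStep (a :: l) ((some ""), none) a
          = (some a, some (pvC (a :: l) a)) := rfl
      rw [hfirst, pv_fold_closed]
    -- B side
    have hitems : ((a :: l).foldl
        (fun (d : PySem.Dict String Int) x => d.insert x (d.getD x 0 + 1))
        PySem.Dict.empty).items
        = (PySem.Set.ofList (a :: l)).map (fun k => (k, ((a :: l).count k : Int))) := by
      rw [PySem.Dict.foldl_insert_getD_add_one_eq_counter, PySem.Dict.items_counter]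
    rw [hA, pvR_eq_sel]
    unfold mostFound_py_alt
    simp only [PySem.Dict.values, hitems, PySem.Set.ofList_cons, List.map_cons,
      List.isEmpty_cons, List.map_map, Function.comp_def, PySem.List.max?_id_cons,
      if_false, Bool.false_eq_true]
    have hcons : ((a, (List.count a (a :: l) : Int)) ::
        List.map (fun k => (k, (List.count k (a :: l) : Int))) ((PySem.Set.ofList l).discard a))
        = List.map (fun k => (k, (List.count k (a :: l) : Int)))
            (a :: (PySem.Set.ofList l).discard a) := rfl
    rw [hcons, List.filter_map, List.map_map]
    have hfun : pvC (a :: l) = fun w => ((List.count w (a :: l) : Int)) := by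
      funext w; simp [pvC, PySem.List.count_eq]
    simp [pvM, hfun, Function.comp_def]

-- ===== VERDICT (by name: the statement is the Claim_ definition above) =====
theorem mostFound_py_spec : Claim_equal_mostFound_py := by
  intro labels _
  unfold Spec_mostFound_py
  exact mostFound_py_spec' labels
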